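-- pv_equiv track=rewrite | github.com/EranStarkLab/SpatiotemporalSpiking | src/read_data.py | find_indices_in_filenames
-- ===== SOURCE A (Python) =====
-- def find_indices_in_filenames(target_name, cell_class_mat):
--     """
--     Finds the relevant slice in the tagging information
--
--     input:
--     target_name: string; recording name
--     cell_class_mat: list; spv information
--
--     return:
--     start_index, end_index: integer tuple; start and end indices of the relevant data in the tagging mat
--     """
--     file_name_arr = cell_class_mat['filename']
--
--     index = 0
--     start_index = 0
--     # find first occurrence of target_name
--     for filenameArr in file_name_arr:
--         filename = filenameArr
--         if filename == target_name:
--             start_index = index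
--             break
--         index += 1
--
--     # find last occurrence of target_name
--     for i in range(start_index, len(file_name_arr)):
--         if file_name_arr[i] != target_name:
--             return start_index, i
--
--     end_index = len(file_name_arr)
--
--     return start_index, end_index
-- ===== SOURCE B (Python) =====
-- def find_indices_in_filenames(target_name, cell_class_mat):
--     """Single-pass state machine: track block start/end while scanning once."""
--     file_name_arr = cell_class_mat['filename']
--     start = 0
--     end = 0
--     in_block = False
--     for i, name in enumerate(file_name_arr):
--         if name == target_name:
--             if not in_block:
--                 start = i
--                 in_block = True
--             end = i + 1
--         elif in_block:
--             break
--     return start, end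
-- ===== Notes on version B (the rewrite author's own statement) =====
-- stated objective: simpler
-- what changed: Replaced A's two sequential scans (find first occurrence, then index-based scan for the end of the run) with a single pass over the filename list using a start/end/in_block state machine that stops right after the block ends.
import Mathlib
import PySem

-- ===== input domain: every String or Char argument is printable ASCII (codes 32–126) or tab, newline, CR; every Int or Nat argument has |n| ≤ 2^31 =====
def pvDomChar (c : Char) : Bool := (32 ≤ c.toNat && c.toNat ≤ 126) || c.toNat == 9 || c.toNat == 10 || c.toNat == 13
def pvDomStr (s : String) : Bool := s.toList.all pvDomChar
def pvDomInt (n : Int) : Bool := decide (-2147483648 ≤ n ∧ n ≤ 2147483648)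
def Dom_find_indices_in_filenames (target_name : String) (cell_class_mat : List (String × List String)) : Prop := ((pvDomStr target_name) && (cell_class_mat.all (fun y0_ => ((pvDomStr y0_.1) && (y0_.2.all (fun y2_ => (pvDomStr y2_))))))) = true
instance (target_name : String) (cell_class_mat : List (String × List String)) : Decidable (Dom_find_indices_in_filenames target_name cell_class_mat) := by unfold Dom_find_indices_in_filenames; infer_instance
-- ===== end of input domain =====

-- B replaces A's two sequential scans with one single-pass start/end/in_block state machine (objective: simpler).
-- ===== PORT A =====
-- first loop of A: find first occurrence of target (start_index stays 0 if absent)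
def pvFindFirstA (target : String) : List String → Int → Int
  | [], _ => 0
  | filename :: rest, index =>
    if filename == target then index else pvFindFirstA target rest (index + 1)

-- second loop of A: for i in range(start, len(arr)): if arr[i] != target: return (start, i)
def pvScanA (target : String) (arr : List String) (start : Int) : List Int → Int × Int
  | [] => (start, (arr.length : Int))
  | i :: rest =>
    if PySem.List.pyGetD arr i "" ≠ target then (start, i)
    else pvScanA target arr start rest

def find_indices_in_filenames (target_name : String) (cell_class_mat : List (String × List String)) : Int × Int :=
  let file_name_arr := ((PySem.Dict.mk cell_class_mat).get? "filename").getD []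
  let start_index := pvFindFirstA target_name file_name_arr 0
  pvScanA target_name file_name_arr start_index
    (PySem.List.pyRange start_index (file_name_arr.length : Int) 1)

-- ===== PORT B =====
-- B's single loop over enumerate(arr) with state (start, end, in_block)
def pvGoB (target : String) : List (Int × String) → Int → Int → Bool → Int × Int
  | [], s, e, _ => (s, e)
  | (i, name) :: rest, s, e, inb =>
    if name == target then
      pvGoB target rest (if inb then s else i) (i + 1) true
    else if inb then (s, e)
    else pvGoB target rest s e inb

def find_indices_in_filenames_alt (target_name : String) (cell_class_mat : List (String × List String)) : Int × Int :=
  let file_name_arr := ((PySem.Dict.mk cell_class_mat).get? "filename").getD []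
  pvGoB target_name (PySem.List.enumerate file_name_arr) 0 0 false

-- ===== PRECONDITION & SPEC =====
-- Python A raises KeyError when the dict has no 'filename' key; Pre_ requires that key to be present.
def Pre_find_indices_in_filenames (target_name : String) (cell_class_mat : List (String × List String)) : Prop :=
  ((PySem.Dict.mk cell_class_mat).get? "filename").isSome = true
instance (target_name : String) (cell_class_mat : List (String × List String)) : Decidable (Pre_find_indices_in_filenames target_name cell_class_mat) := by unfold Pre_find_indices_in_filenames; infer_instance

def pvWitness_find_indices_in_filenames : String × (List (String × List String)) :=
  ("b", [("filename", ["a", "b", "b", "c"])])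

def Spec_find_indices_in_filenames (target_name : String) (cell_class_mat : List (String × List String)) (out : Int × Int) : Prop := out = find_indices_in_filenames_alt target_name cell_class_mat
instance (target_name : String) (cell_class_mat : List (String × List String)) (out : Int × Int) : Decidable (Spec_find_indices_in_filenames target_name cell_class_mat out) := by unfold Spec_find_indices_in_filenames; infer_instance

-- ===== CLAIM (what is proved, stated in full; the proofs are below) =====
def Claim_equal_find_indices_in_filenames : Prop := ∀ (target_name : String) (cell_class_mat : List (String × List String)), Dom_find_indices_in_filenames target_name cell_class_mat → Pre_find_indices_in_filenames target_name cell_class_mat → Spec_find_indices_in_filenames target_name cell_class_mat (find_indices_in_filenames target_name cell_class_mat)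

-- ===== LEMMAS AND PROOFS =====

-- A's first loop returns (absolute) first-occurrence index, or 0 when target is absent
theorem pvFindFirstA_eq (t : String) (l : List String) (i : Int) :
    pvFindFirstA t l i = if t ∈ l then i + (l.idxOf t : Int) else 0 := by
  induction l generalizing i with
  | nil => simp [pvFindFirstA]
  | cons x xs ih =>
    by_cases hx : x = t
    · subst hx; simp [pvFindFirstA, List.idxOf_cons_self]
    · have hbeq : (x == t) = false := by simpa using hx
      simp only [pvFindFirstA, hbeq, Bool.false_eq_true, if_false, ih,
        List.mem_cons, List.idxOf_cons, hbeq, cond_false]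
      by_cases hm : t ∈ xs
      · simp only [hm, Ne.symm hx, false_or, if_true]; push_cast; ring
      · simp [hm, Ne.symm hx]

-- A's second loop: scanning from k returns (s, k + length of the run of targets starting at k)
theorem pvScanA_eq (t : String) (arr : List String) (s : Int) :
    ∀ k : Nat, k ≤ arr.length →
      pvScanA t arr s (PySem.List.pyRange (k : Int) (arr.length : Int) 1)
        = (s, (k : Int) + (((arr.drop k).takeWhile (fun x => x == t)).length : Int)) := by
  intro k hk
  induction hfuel : arr.length - k generalizing k with
  | zero =>
    have hk' : k = arr.length := by omega
    subst hk'
    simp [pvScanA, PySem.List.pyRange_one_eq_nil le_rfl, List.drop_length]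
  | succ d ih =>
    have hlt : k < arr.length := by omega
    rw [PySem.List.pyRange_one_cons (show (k : Int) < (arr.length : Int) by exact_mod_cast hlt)]
    have hget : PySem.List.pyGetD arr (k : Int) "" = arr[k] := by
      simp [List.getD_eq_getElem?_getD, List.getElem?_eq_getElem hlt]
    have hdrop : arr.drop k = arr[k] :: arr.drop (k + 1) := List.drop_eq_getElem_cons hlt
    by_cases hx : arr[k] = t
    · have hstep : pvScanA t arr s ((k : Int) :: PySem.List.pyRange ((k : Int) + 1) (arr.length : Int) 1)
          = pvScanA t arr s (PySem.List.pyRange ((k : Int) + 1) (arr.length : Int) 1) := by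
        simp [pvScanA, hget, hx]
      rw [hstep]
      have hrec := ih (k + 1) (by omega) (by omega)
      push_cast at hrec ⊢
      rw [hrec, hdrop]
      simp only [List.takeWhile_cons, hx, beq_self_eq_true]
      exact Prod.ext rfl (by push_cast [List.length_cons]; ring)
    · have hbeq : (arr[k] == t) = false := by simpa using hx
      have hstep : pvScanA t arr s ((k : Int) :: PySem.List.pyRange ((k : Int) + 1) (arr.length : Int) 1)
          = (s, (k : Int)) := by
        simp [pvScanA, hget, hx]
      rw [hstep, hdrop]
      simp [List.takeWhile_cons, hbeq]

-- B's loop once inside the block (end = current position i): consumes the remaining run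
theorem pvGoB_inblock (t : String) (l : List String) (i s : Int) :
    pvGoB t (PySem.List.enumerate l i) s i true
      = (s, i + ((l.takeWhile (fun x => x == t)).length : Int)) := by
  induction l generalizing i with
  | nil => simp [PySem.List.enumerate_nil, pvGoB]
  | cons x xs ih =>
    rw [PySem.List.enumerate_cons]
    by_cases hx : x = t
    · have hbeq : (x == t) = true := by simpa using hx
      simp only [pvGoB, hbeq, if_true, List.takeWhile_cons, List.length_cons]
      rw [ih (i + 1)]
      push_cast
      exact Prod.ext rfl (by ring)
    · have hbeq : (x == t) = false := by simpa using hx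
      simp [pvGoB, hbeq, List.takeWhile_cons]

-- B's loop before any match
theorem pvGoB_search (t : String) (l : List String) (i : Int) :
    pvGoB t (PySem.List.enumerate l i) 0 0 false
      = if t ∈ l then
          (i + (l.idxOf t : Int),
           i + (l.idxOf t : Int) + 1 + (((l.drop (l.idxOf t + 1)).takeWhile (fun x => x == t)).length : Int))
        else (0, 0) := by
  induction l generalizing i with
  | nil => simp [PySem.List.enumerate_nil, pvGoB]
  | cons x xs ih =>
    rw [PySem.List.enumerate_cons]
    by_cases hx : x = t
    · have hbeq : (x == t) = true := by simpa using hx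
      simp only [pvGoB, hbeq, if_true, Bool.false_eq_true, if_false]
      rw [pvGoB_inblock _ xs (i + 1)]
      have hm : t ∈ x :: xs := by rw [← hx]; exact List.mem_cons_self
      have hidx : (x :: xs).idxOf t = 0 := by rw [← hx]; exact List.idxOf_cons_self
      simp only [hm, if_true, hidx, List.drop_succ_cons, List.drop_zero]
      push_cast
      exact Prod.ext (by ring) (by ring)
    · have hbeq : (x == t) = false := by simpa using hx
      simp only [pvGoB, hbeq, Bool.false_eq_true, if_false, ih (i + 1),
        List.mem_cons, List.idxOf_cons, hbeq, cond_false]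
      by_cases hm : t ∈ xs
      · simp only [hm, Ne.symm hx, false_or, if_true, List.drop_succ_cons]
        push_cast
        exact Prod.ext (by ring) (by ring)
      · simp [hm, Ne.symm hx]

-- the two cores agree on any filename list
theorem core_eq (t : String) (arr : List String) :
    pvScanA t arr (pvFindFirstA t arr 0)
        (PySem.List.pyRange (pvFindFirstA t arr 0) (arr.length : Int) 1)
      = pvGoB t (PySem.List.enumerate arr) 0 0 false := by
  rw [pvFindFirstA_eq, pvGoB_search]
  by_cases hm : t ∈ arr
  · have hp : arr.idxOf t < arr.length := List.idxOf_lt_length_of_mem hm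
    have harr : arr[arr.idxOf t] = t := List.getElem_idxOf hp
    have hdrop : arr.drop (arr.idxOf t) = t :: arr.drop (arr.idxOf t + 1) := by
      rw [List.drop_eq_getElem_cons hp, harr]
    simp only [hm, if_true, zero_add]
    rw [pvScanA_eq t arr _ (arr.idxOf t) (le_of_lt hp), hdrop]
    simp only [List.takeWhile_cons, beq_self_eq_true]
    exact Prod.ext rfl (by push_cast [List.length_cons]; ring)
  · simp only [hm, if_false, zero_add]
    have h0 := pvScanA_eq t arr 0 0 (Nat.zero_le _)
    simp only [Nat.cast_zero, List.drop_zero, zero_add] at h0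
    rw [h0]
    have htw : arr.takeWhile (fun x => x == t) = [] := by
      cases arr with
      | nil => rfl
      | cons x xs =>
        have hbeq : (x == t) = false := by
          have hxne : x ≠ t := fun h => hm (by rw [← h]; exact List.mem_cons_self)
          simpa using hxne
        simp [List.takeWhile_cons, hbeq]
    simp [htw]

-- ===== VERDICT (by name: the statement is the Claim_ definition above) =====
theorem find_indices_in_filenames_spec : Claim_equal_find_indices_in_filenames := by
  intro t m _ _
  unfold Spec_find_indices_in_filenames find_indices_in_filenames find_indices_in_filenames_alt
  exact core_eq t _
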